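-- pv_equiv track=rewrite | github.com/Apothic-AI/guidance | scripts/openrouter_provider_grammar_discovery.py | _recommended_format
-- ===== SOURCE A (Python) =====
-- def _recommended_format(format_counts: dict[str, dict[str, int]]) -> str | None:
--     ranked: list[tuple[int, int, str]] = []
--     for grammar_format, counts in format_counts.items():
--         obey = int(counts.get("accepts+obeys", 0))
--         reject = int(counts.get("reject", 0))
--         ranked.append((obey, -reject, grammar_format))
--     if not ranked:
--         return None
--     ranked.sort(reverse=True)
--     best = ranked[0]
--     if best[0] <= 0:
--         return None
--     return best[2]
-- ===== SOURCE B (Python) =====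
-- def _recommended_format(format_counts: dict[str, dict[str, int]]) -> str | None:
--     entries = [(f, int(c.get("accepts+obeys", 0)), int(c.get("reject", 0)))
--                for f, c in format_counts.items()]
--     if not entries:
--         return None
--     best_obey = max(o for _, o, _ in entries)
--     if best_obey <= 0:
--         return None
--     tied = [e for e in entries if e[1] == best_obey]
--     min_rej = min(r for _, _, r in tied)
--     tied2 = [e for e in tied if e[2] == min_rej]
--     return max(f for f, _, _ in tied2)
-- ===== Notes on version B (the rewrite author's own statement) =====
-- stated objective: faster
-- what changed: Replaces building a list of (obey, -reject, format) tuples and sorting it in reverse with three staged linear argmax passes: max obey, then among the tied formats min reject, then the lexicographically greatest format name.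
import Mathlib
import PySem

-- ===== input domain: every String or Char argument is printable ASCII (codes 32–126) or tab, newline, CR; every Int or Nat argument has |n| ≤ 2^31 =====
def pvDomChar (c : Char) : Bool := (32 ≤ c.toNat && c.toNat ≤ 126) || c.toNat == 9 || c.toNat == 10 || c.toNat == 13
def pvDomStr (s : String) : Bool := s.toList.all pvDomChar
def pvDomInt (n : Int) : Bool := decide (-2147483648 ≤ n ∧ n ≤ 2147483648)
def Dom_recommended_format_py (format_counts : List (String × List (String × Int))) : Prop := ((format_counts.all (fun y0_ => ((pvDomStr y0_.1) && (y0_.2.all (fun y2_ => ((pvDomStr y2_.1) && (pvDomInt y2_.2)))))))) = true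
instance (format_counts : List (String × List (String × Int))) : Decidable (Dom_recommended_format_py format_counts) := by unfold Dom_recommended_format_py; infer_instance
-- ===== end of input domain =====

-- B replaces A's build-list-then-sort(reverse=True) by three staged linear argmax passes (objective: faster).

-- Python's lexicographic order on the tuple (obey, -reject, grammar_format)
def pvKey (t : Int × Int × String) : Int ×ₗ (Int ×ₗ String) := toLex (t.1, toLex (t.2.1, t.2.2))

-- ===== PORT A =====
def recommended_format_py (format_counts : List (String × List (String × Int))) : Option String :=
  let ranked : List (Int × Int × String) :=
    format_counts.foldl (fun acc p =>
      let obey := PySem.Dict.getD (PySem.Dict.mk p.2) "accepts+obeys" 0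
      let reject := PySem.Dict.getD (PySem.Dict.mk p.2) "reject" 0
      acc ++ [(obey, -reject, p.1)]) []
  if ranked = [] then none
  else
    match PySem.List.sorted ranked pvKey true with
    | [] => none  -- unreachable: sorted of a nonempty list is nonempty
    | best :: _ => if best.1 ≤ 0 then none else some best.2.2

-- ===== PORT B =====
def recommended_format_py_alt (format_counts : List (String × List (String × Int))) : Option String :=
  let entries : List (String × Int × Int) :=
    format_counts.map (fun p =>
      (p.1, PySem.Dict.getD (PySem.Dict.mk p.2) "accepts+obeys" 0,
            PySem.Dict.getD (PySem.Dict.mk p.2) "reject" 0))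
  if entries = [] then none
  else
    match PySem.List.max? (entries.map (fun e => e.2.1)) (fun x => x) with
    | none => none  -- unreachable: entries ≠ []
    | some bestObey =>
      if bestObey ≤ 0 then none
      else
        let tied := entries.filter (fun e => e.2.1 == bestObey)
        match PySem.List.min? (tied.map (fun e => e.2.2)) (fun x => x) with
        | none => none  -- unreachable: the maximiser is in tied
        | some minRej =>
          let tied2 := tied.filter (fun e => e.2.2 == minRej)
          match PySem.List.max? (tied2.map (fun e => e.1)) (fun x => x) with
          | none => none  -- unreachable
          | some name => some name

-- ===== PRECONDITION & SPEC =====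
def Spec_recommended_format_py (format_counts : List (String × List (String × Int))) (out : Option String) : Prop := out = recommended_format_py_alt format_counts
instance (format_counts : List (String × List (String × Int))) (out : Option String) : Decidable (Spec_recommended_format_py format_counts out) := by unfold Spec_recommended_format_py; infer_instance

-- ===== CLAIM (what is proved, stated in full; the proofs are below) =====
def Claim_equal_recommended_format_py : Prop := ∀ (format_counts : List (String × List (String × Int))), Dom_recommended_format_py format_counts → Spec_recommended_format_py format_counts (recommended_format_py format_counts)

-- ===== LEMMAS AND PROOFS =====

def pvB (p : String × List (String × Int)) : String × Int × Int :=
  (p.1, PySem.Dict.getD (PySem.Dict.mk p.2) "accepts+obeys" 0,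
        PySem.Dict.getD (PySem.Dict.mk p.2) "reject" 0)

def pvSigma (e : String × Int × Int) : Int × Int × String := (e.2.1, -e.2.2, e.1)

theorem pvKey_le_fst {a b : Int × Int × String} (h : pvKey a ≤ pvKey b) : a.1 ≤ b.1 := by
  rcases Prod.Lex.toLex_le_toLex.mp h with h1 | ⟨h1, _⟩
  · exact le_of_lt h1
  · exact le_of_eq h1

theorem pvKey_le_snd {a b : Int × Int × String} (h : pvKey a ≤ pvKey b) (h1 : a.1 = b.1) :
    a.2.1 ≤ b.2.1 := by
  rcases Prod.Lex.toLex_le_toLex.mp h with hlt | ⟨_, h2⟩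
  · exact absurd h1 (ne_of_lt hlt)
  · rcases Prod.Lex.toLex_le_toLex.mp h2 with hlt | ⟨heq, _⟩
    · exact le_of_lt hlt
    · exact le_of_eq heq

theorem pvKey_le_trd {a b : Int × Int × String} (h : pvKey a ≤ pvKey b) (h1 : a.1 = b.1)
    (h2 : a.2.1 = b.2.1) : a.2.2 ≤ b.2.2 := by
  rcases Prod.Lex.toLex_le_toLex.mp h with hlt | ⟨_, h3⟩
  · exact absurd h1 (ne_of_lt hlt)
  · rcases Prod.Lex.toLex_le_toLex.mp h3 with hlt | ⟨_, h4⟩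
    · exact absurd h2 (ne_of_lt hlt)
    · exact h4

-- ===== VERDICT (by name: the statement is the Claim_ definition above) =====
theorem recommended_format_py_spec : Claim_equal_recommended_format_py := by
  intro fc _
  unfold Spec_recommended_format_py recommended_format_py recommended_format_py_alt
  simp only [PySem.List.foldl_append_singleton_eq_map, List.nil_append]
  have hA : fc.map (fun p => (PySem.Dict.getD (PySem.Dict.mk p.2) "accepts+obeys" 0,
      -(PySem.Dict.getD (PySem.Dict.mk p.2) "reject" 0), p.1)) = (fc.map pvB).map pvSigma := by
    rw [List.map_map]; rfl
  have hB : fc.map (fun p =>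
      (p.1, PySem.Dict.getD (PySem.Dict.mk p.2) "accepts+obeys" 0,
            PySem.Dict.getD (PySem.Dict.mk p.2) "reject" 0)) = fc.map pvB := rfl
  rw [hA, hB]
  set l := fc.map pvB with hl
  by_cases hnil : l = []
  · simp [hnil]
  · have hrnil : l.map pvSigma ≠ [] := by simp [hnil]
    rw [if_neg hrnil, if_neg hnil]
    cases hs : PySem.List.sorted (l.map pvSigma) pvKey true with
    | nil => exact absurd ((PySem.List.sorted_eq_nil_iff _ _ _).mp hs) hrnil
    | cons m t =>
      have hmmem : m ∈ l.map pvSigma := by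
        have : m ∈ PySem.List.sorted (l.map pvSigma) pvKey true := by rw [hs]; simp
        exact (PySem.List.mem_sorted _ _ _ _).mp this
      have hmax : ∀ y ∈ l.map pvSigma, pvKey y ≤ pvKey m :=
        PySem.List.key_head_sorted_rev_ge _ pvKey hs
      obtain ⟨em, hemmem, hemeq⟩ := List.mem_map.mp hmmem
      -- step 1: bestObey = m.1
      have hm1 : em.2.1 = m.1 := by rw [← hemeq]; rfl
      cases hbo : PySem.List.max? (l.map (fun e => e.2.1)) (fun x => x) with
      | none =>
        exact absurd ((PySem.List.max?_eq_none_iff _ _).mp hbo) (by simp [hnil])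
      | some bestObey =>
        have hub : ∀ y ∈ l.map (fun e => e.2.1), y ≤ bestObey := by
          intro y hy; exact PySem.List.max?_isMax hbo y hy
        have hbo_le : bestObey ≤ m.1 := by
          obtain ⟨e, hemem, heq⟩ := List.mem_map.mp (PySem.List.max?_mem hbo)
          have := pvKey_le_fst (hmax (pvSigma e) (List.mem_map_of_mem hemem))
          simpa [pvSigma, heq] using this
        have hbo_ge : m.1 ≤ bestObey := by
          have := hub em.2.1 (List.mem_map.mpr ⟨em, hemmem, rfl⟩)
          rwa [hm1] at this
        have hboeq : bestObey = m.1 := le_antisymm hbo_le hbo_ge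
        subst hboeq
        dsimp only
        by_cases hpos : m.1 ≤ 0
        · simp [hpos]
        · rw [if_neg hpos, if_neg hpos]
          -- step 2: minRej = -m.2.1
          have hemtied : em ∈ l.filter (fun e => e.2.1 == m.1) := by
            refine List.mem_filter.mpr ⟨hemmem, ?_⟩
            simp [hm1]
          cases hmr : PySem.List.min? ((l.filter (fun e => e.2.1 == m.1)).map (fun e => e.2.2)) (fun x => x) with
          | none =>
            have : (l.filter (fun e => e.2.1 == m.1)).map (fun e => e.2.2) = [] :=
              (PySem.List.min?_eq_none_iff _ _).mp hmr
            rw [List.map_eq_nil_iff] at this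
            exact absurd (this ▸ hemtied) (List.not_mem_nil)
          | some minRej =>
            have hem2 : em.2.2 = -m.2.1 := by
              have : -em.2.2 = m.2.1 := by rw [← hemeq]; rfl
              omega
            have hlb : ∀ y ∈ (l.filter (fun e => e.2.1 == m.1)).map (fun e => e.2.2),
                minRej ≤ y := by
              intro y hy; exact PySem.List.min?_isMin hmr y hy
            have hmr_le : minRej ≤ -m.2.1 := by
              have := hlb em.2.2 (List.mem_map.mpr ⟨em, hemtied, rfl⟩)
              rwa [hem2] at this
            have hmr_ge : -m.2.1 ≤ minRej := by
              obtain ⟨e, hemem, heq⟩ := List.mem_map.mp (PySem.List.min?_mem hmr)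
              obtain ⟨hel, he1⟩ := List.mem_filter.mp hemem
              have he1' : e.2.1 = m.1 := by simpa using he1
              have hk := hmax (pvSigma e) (List.mem_map_of_mem hel)
              have := pvKey_le_snd hk (by simpa [pvSigma] using he1')
              simp only [pvSigma] at this
              omega
            have hmreq : minRej = -m.2.1 := le_antisymm hmr_le hmr_ge
            subst hmreq
            dsimp only
            -- step 3: name = m.2.2
            have hemtied2 : em ∈ (l.filter (fun e => e.2.1 == m.1)).filter
                (fun e => e.2.2 == -m.2.1) := by
              refine List.mem_filter.mpr ⟨hemtied, ?_⟩
              simp [hem2]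
            cases hnm : PySem.List.max? (((l.filter (fun e => e.2.1 == m.1)).filter
                (fun e => e.2.2 == -m.2.1)).map (fun e => e.1)) (fun x => x) with
            | none =>
              have : _ = ([] : List String) := (PySem.List.max?_eq_none_iff _ _).mp hnm
              rw [List.map_eq_nil_iff] at this
              exact absurd (this ▸ hemtied2) (List.not_mem_nil)
            | some name =>
              have hem1 : em.1 = m.2.2 := by rw [← hemeq]; rfl
              have hn_ge : m.2.2 ≤ name := by
                have := PySem.List.max?_isMax hnm em.1
                  (List.mem_map.mpr ⟨em, hemtied2, rfl⟩)
                rwa [hem1] at this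
              have hn_le : name ≤ m.2.2 := by
                obtain ⟨e, hemem, heq⟩ := List.mem_map.mp (PySem.List.max?_mem hnm)
                obtain ⟨hef, he2⟩ := List.mem_filter.mp hemem
                obtain ⟨hel, he1⟩ := List.mem_filter.mp hef
                have he1' : e.2.1 = m.1 := by simpa using he1
                have he2' : e.2.2 = -m.2.1 := by simpa using he2
                have hk := hmax (pvSigma e) (List.mem_map_of_mem hel)
                have := pvKey_le_trd hk (by simpa [pvSigma] using he1')
                  (by simp [pvSigma]; omega)
                simpa [pvSigma, heq] using this
              rw [le_antisymm hn_le hn_ge]
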